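-- pv_equiv track=rewrite | github.com/mumblingMac/AoC | 2021/10/run.py | autocomplete_scorer
-- ===== SOURCE A (Python) =====
-- def autocomplete_scorer(completion_stack: list):
--     character_points = {
--         ")": 1,
--         "]": 2,
--         "}": 3,
--         ">": 4,
--     }
--
--     score = 0
--     for element in completion_stack:
--         score = (score * 5) + character_points[element]
--
--     return score
-- ===== SOURCE B (Python) =====
-- def autocomplete_scorer(completion_stack: list):
--     character_points = {
--         ")": 1,
--         "]": 2,
--         "}": 3,
--         ">": 4,
--     }
--
--     total = 0
--     mult = 1
--     for element in reversed(completion_stack):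
--         total += character_points[element] * mult
--         mult *= 5
--     return total
-- ===== Notes on version B (the rewrite author's own statement) =====
-- stated objective: alternative
-- what changed: Replaces the forward Horner fold (score = score*5 + pts) with a back-to-front pass that accumulates pts*mult while maintaining a power-of-5 multiplier.
-- outside the precondition, e.g. on autocomplete_scorer(['x']): A raises KeyError, B raises KeyError
import Mathlib
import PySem

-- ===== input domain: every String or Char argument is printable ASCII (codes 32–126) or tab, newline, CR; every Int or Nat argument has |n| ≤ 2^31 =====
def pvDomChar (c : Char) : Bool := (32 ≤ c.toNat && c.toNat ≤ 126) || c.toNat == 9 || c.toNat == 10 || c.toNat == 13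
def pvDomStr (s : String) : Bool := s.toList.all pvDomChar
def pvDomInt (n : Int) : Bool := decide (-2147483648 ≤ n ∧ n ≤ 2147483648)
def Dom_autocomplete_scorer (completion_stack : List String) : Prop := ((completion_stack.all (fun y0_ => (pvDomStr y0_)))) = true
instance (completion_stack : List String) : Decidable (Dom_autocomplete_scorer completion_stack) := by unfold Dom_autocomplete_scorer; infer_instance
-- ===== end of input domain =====

-- B replaces A's forward Horner fold by a back-to-front pass with a power-of-5 multiplier (objective: alternative decomposition).

-- ===== PORT A =====
-- the character_points dict (shared literal; A's Python raises KeyError on a missing key, excluded by Pre_)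
def pvCharPoints : PySem.Dict String Int :=
  PySem.Dict.ofList [(")", 1), ("]", 2), ("}", 3), (">", 4)]

def autocomplete_scorer (completion_stack : List String) : Int :=
  completion_stack.foldl (fun score element => score * 5 + pvCharPoints.getD element 0) 0

-- ===== PORT B =====
-- the loop 'for element in reversed(completion_stack): total += pts*mult; mult *= 5'
def pvScoreLoop : Int × Int → List String → Int × Int
  | st, [] => st
  | (total, mult), element :: rest =>
      pvScoreLoop (total + pvCharPoints.getD element 0 * mult, mult * 5) rest

def autocomplete_scorer_alt (completion_stack : List String) : Int :=
  (pvScoreLoop (0, 1) completion_stack.reverse).1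

-- ===== PRECONDITION & SPEC =====
-- Pre_ excludes stacks containing a character other than ) ] } >, on which the Python raises KeyError.
def Pre_autocomplete_scorer (completion_stack : List String) : Prop :=
  ∀ s ∈ completion_stack, s = ")" ∨ s = "]" ∨ s = "}" ∨ s = ">"
instance (completion_stack : List String) : Decidable (Pre_autocomplete_scorer completion_stack) := by
  unfold Pre_autocomplete_scorer; infer_instance

def pvWitness_autocomplete_scorer : List String := [")", "]", ">"]

def Spec_autocomplete_scorer (completion_stack : List String) (out : Int) : Prop := out = autocomplete_scorer_alt completion_stack
instance (completion_stack : List String) (out : Int) : Decidable (Spec_autocomplete_scorer completion_stack out) := by unfold Spec_autocomplete_scorer; infer_instance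

-- ===== CLAIM (what is proved, stated in full; the proofs are below) =====
def Claim_equal_autocomplete_scorer : Prop := ∀ (completion_stack : List String), Dom_autocomplete_scorer completion_stack → Pre_autocomplete_scorer completion_stack → Spec_autocomplete_scorer completion_stack (autocomplete_scorer completion_stack)

-- ===== LEMMAS AND PROOFS =====

-- B's reverse-order loop computes t + m · (Horner value of the reversed list)
theorem pvScoreLoop_spec (r : List String) : ∀ (t m : Int),
    (pvScoreLoop (t, m) r).1 =
      t + m * (r.reverse.foldl (fun score element => score * 5 + pvCharPoints.getD element 0) 0) := by
  induction r with
  | nil => intro t m; simp [pvScoreLoop]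
  | cons e rs ih =>
      intro t m
      simp only [pvScoreLoop, ih, List.reverse_cons, List.foldl_append, List.foldl_cons,
        List.foldl_nil]
      ring

-- ===== VERDICT (by name: the statement is the Claim_ definition above) =====
theorem autocomplete_scorer_spec : Claim_equal_autocomplete_scorer := by
  intro cs _ _
  unfold Spec_autocomplete_scorer autocomplete_scorer autocomplete_scorer_alt
  rw [pvScoreLoop_spec]
  simp
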